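-- pv_equiv track=rewrite | github.com/andycranston/puttyauto | puttyauto.py | wordstring
-- ===== SOURCE A (Python) =====
-- def wordstring(line):
--     line = line.strip()
--
--     lenline = len(line)
--
--     if lenline == 0:
--         return '', ''
--
--     words = line.split()
--
--     if len(words) == 0:
--         return '', ''
--
--     word = words[0]
--
--     i = len(word)
--
--     while i < lenline:
--         if (line[i] == ' '):
--             i += 1
--         else:
--             break
--
--     string = line[i:]
--
--     return word, string
-- ===== SOURCE B (Python) =====
-- def wordstring(line):
--     # single forward state-machine scan over the characters; no strip/split/slicing
--     word = []
--     rest = []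
--     state = 0  # 0: leading whitespace, 1: in word, 2: spaces after word, 3: remainder
--     for ch in line:
--         if state == 0:
--             if ch.isspace():
--                 continue
--             state = 1
--         if state == 1:
--             if ch.isspace():
--                 state = 2
--             else:
--                 word.append(ch)
--                 continue
--         if state == 2:
--             if ch == ' ':
--                 continue
--             state = 3
--         rest.append(ch)
--     while rest and rest[-1].isspace():
--         rest.pop()
--     return ''.join(word), ''.join(rest)
-- ===== Notes on version B (the rewrite author's own statement) =====
-- stated objective: alternative
-- what changed: B replaces A's strip+split+index-scan staging with a single forward character scan driven by a 4-state machine (leading-ws / word / space-skip / remainder) plus a trailing-whitespace pop loop, never materialising the stripped line or the word list.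
import Mathlib
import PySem

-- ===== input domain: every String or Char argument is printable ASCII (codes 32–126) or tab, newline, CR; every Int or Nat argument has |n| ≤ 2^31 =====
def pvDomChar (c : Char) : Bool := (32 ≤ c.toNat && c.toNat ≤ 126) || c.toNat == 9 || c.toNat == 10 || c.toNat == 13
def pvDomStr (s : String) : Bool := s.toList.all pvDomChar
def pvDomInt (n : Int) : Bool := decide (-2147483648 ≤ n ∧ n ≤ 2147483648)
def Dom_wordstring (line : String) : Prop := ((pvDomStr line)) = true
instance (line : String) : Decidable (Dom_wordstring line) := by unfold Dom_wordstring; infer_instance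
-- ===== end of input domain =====

-- B replaces A's strip+split+index-scan staging with a single forward 4-state character scan
-- plus a trailing-whitespace pop loop; same cost, different algorithm.

-- ===== PORT A =====
-- the 'while i < lenline: if line[i] == " ": i += 1 else: break' loop of A
def wordstringSkip (s : List Char) (lenline i : Nat) : Nat :=
  if _h : i < lenline then
    if PySem.List.pyGet? s (i : Int) = some ' ' then wordstringSkip s lenline (i + 1) else i
  else i
termination_by lenline - i

def wordstring (line : String) : String × String :=
  let s := (PySem.Str.strip line).toList
  let lenline := s.length
  if lenline = 0 then ("", "")
  else
    let words := PySem.Chars.split₀ s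
    if words.length = 0 then ("", "")
    else
      let word := words.headD []          -- words[0], guarded nonempty
      let i := wordstringSkip s lenline word.length
      (String.ofList word, String.ofList (PySem.List.slice s (some (i : Int)) none))

-- ===== PORT B =====
-- one step of the for-loop's state machine: state 0 = leading whitespace, 1 = in word,
-- 2 = spaces after word, 3 = remainder (Python's fall-through between the if-blocks is inlined)
def wordstringStep (st : Nat) (word rest : List Char) (ch : Char) : Nat × List Char × List Char :=
  if st = 0 ∧ PySem.Chars.isspace ch then (st, word, rest)           -- state 0, whitespace: continue
  else
    let st := if st = 0 then 1 else st                               -- state 0 falls into state 1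
    if st = 1 then
      if PySem.Chars.isspace ch then
        -- state := 2, fall through to the state-2 block with the same ch
        if ch = ' ' then (2, word, rest) else (3, word, rest ++ [ch])
      else (st, word ++ [ch], rest)                                  -- word.append(ch); continue
    else if st = 2 then
      if ch = ' ' then (st, word, rest) else (3, word, rest ++ [ch]) -- fall through appends ch
    else (st, word, rest ++ [ch])                                    -- state 3: rest.append(ch)

-- the 'while rest and rest[-1].isspace(): rest.pop()' loop
def wordstringPop (rest : List Char) : List Char :=
  match h : rest.getLast? with
  | none => rest
  | some c => if PySem.Chars.isspace c then wordstringPop rest.dropLast else rest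
termination_by rest.length
decreasing_by
  have hne : rest ≠ [] := by intro hn; rw [hn] at h; simp at h
  have hl : 0 < rest.length := List.length_pos_iff.mpr hne
  simpa [List.length_dropLast] using Nat.sub_lt hl one_pos

def wordstring_alt (line : String) : String × String :=
  let fin := line.toList.foldl (fun acc ch => wordstringStep acc.1 acc.2.1 acc.2.2 ch) (0, [], [])
  (String.ofList fin.2.1, String.ofList (wordstringPop fin.2.2))

-- ===== PRECONDITION & SPEC =====
def Spec_wordstring (line : String) (out : String × String) : Prop := out = wordstring_alt line
instance (line : String) (out : String × String) : Decidable (Spec_wordstring line out) := by unfold Spec_wordstring; infer_instance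

-- ===== CLAIM (what is proved, stated in full; the proofs are below) =====
def Claim_equal_wordstring : Prop := ∀ (line : String), Dom_wordstring line → Spec_wordstring line (wordstring line)


-- ===== LEMMAS AND PROOFS =====

-- ---- A-side: characterisation of the strip/split₀/skip pipeline ----

-- head of split₀.go with a nonempty accumulator is the oldest accumulated word
theorem pv_go_headD (t : List Char) :
    ∀ (cur : List Char) (acc : List (List Char)) (a : List Char),
      (PySem.Chars.split₀.go t cur (acc ++ [a])).headD [] = a := by
  induction t with
  | nil =>
    intro cur acc a
    simp only [PySem.Chars.split₀.go]
    split <;> simp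
  | cons c rest ih =>
    intro cur acc a
    simp only [PySem.Chars.split₀.go]
    split
    · split
      · exact ih [] acc a
      · exact ih [] (cur.reverse :: acc) a
    · exact ih (c :: cur) acc a

-- head of split₀.go with an empty accumulator extends the current word with the next non-space run
theorem pv_go_head (t : List Char) :
    ∀ (cur : List Char), cur ≠ [] →
      (PySem.Chars.split₀.go t cur []).headD []
        = cur.reverse ++ t.takeWhile (fun c => !PySem.Chars.isspace c) := by
  induction t with
  | nil => intro cur h; simp [PySem.Chars.split₀.go, h]
  | cons c rest ih =>
    intro cur h
    simp only [PySem.Chars.split₀.go]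
    by_cases hc : PySem.Chars.isspace c = true
    · rw [if_pos hc]
      have hne : cur.isEmpty = false := by simpa [List.isEmpty_iff] using h
      rw [hne]
      simp only [Bool.false_eq_true, if_false]
      rw [show ([cur.reverse] : List (List Char)) = [] ++ [cur.reverse] from rfl,
        pv_go_headD rest [] [] cur.reverse]
      simp [hc]
    · rw [if_neg hc, ih (c :: cur) (by simp)]
      simp only [Bool.not_eq_true] at hc
      simp [hc, List.reverse_cons]

theorem pv_split₀_head (c : Char) (rest : List Char) (hc : PySem.Chars.isspace c = false) :
    (PySem.Chars.split₀ (c :: rest)).headD []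
      = (c :: rest).takeWhile (fun c => !PySem.Chars.isspace c) := by
  unfold PySem.Chars.split₀
  simp only [PySem.Chars.split₀.go, hc, Bool.false_eq_true, if_false]
  rw [pv_go_head rest [c] (by simp)]
  simp [hc]

-- the skip loop drops exactly the leading spaces of the remaining suffix
theorem pv_skip_drop (s : List Char) (i : Nat) :
    s.drop (wordstringSkip s s.length i) = (s.drop i).dropWhile (· == ' ') := by
  induction hn : s.length - i using Nat.strong_induction_on generalizing i with
  | _ n ih =>
    unfold wordstringSkip
    by_cases h : i < s.length
    · have hdrop : s.drop i = s[i] :: s.drop (i + 1) := List.drop_eq_getElem_cons h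
      have hget : PySem.List.pyGet? s (i : Int) = some s[i] := by
        simp [PySem.List.pyGet?, PySem.List.pyIdx?, h]
      by_cases hsp : s[i] = ' '
      · rw [dif_pos h, if_pos (by rw [hget, hsp])]
        rw [ih (s.length - (i + 1)) (by omega) (i + 1) rfl, hdrop]
        simp [hsp]
      · rw [dif_pos h, if_neg (by rw [hget]; simp [hsp])]
        rw [hdrop, List.dropWhile_cons, if_neg (by simp [hsp])]
    · rw [dif_neg h]
      have hnil : s.drop i = [] := List.drop_eq_nil_of_le (by omega)
      simp [hnil]

-- the head of strip's output is not whitespace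
theorem pv_strip_head (u : List Char) (c : Char) (rest : List Char)
    (h : PySem.Chars.strip u = c :: rest) : PySem.Chars.isspace c = false := by
  unfold PySem.Chars.strip PySem.Chars.rstrip at h
  have hsuf : List.dropWhile PySem.Chars.isspace (PySem.Chars.lstrip u).reverse
      <:+ (PySem.Chars.lstrip u).reverse := List.dropWhile_suffix _
  have hpre : (List.dropWhile PySem.Chars.isspace (PySem.Chars.lstrip u).reverse).reverse
      <+: PySem.Chars.lstrip u :=
    List.reverse_suffix.mp (by simpa using hsuf)
  rw [h] at hpre
  obtain ⟨tail, htail⟩ := hpre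
  unfold PySem.Chars.lstrip at htail
  have hcons : List.dropWhile PySem.Chars.isspace u = c :: (rest ++ tail) := by
    simpa using htail.symm
  have hne : List.dropWhile PySem.Chars.isspace u ≠ [] := by simp [hcons]
  have h2 := List.head_dropWhile_not (p := PySem.Chars.isspace) (l := u) hne
  have hhd : (List.dropWhile PySem.Chars.isspace u).head hne = c := by simp [hcons]
  rw [hhd] at h2
  simpa using h2

-- dropping the first word's length is dropping the word
theorem pv_drop_takeWhile (p : Char → Bool) (l : List Char) :
    l.drop (l.takeWhile p).length = l.dropWhile p := by
  calc l.drop (l.takeWhile p).length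
      = (l.takeWhile p ++ l.dropWhile p).drop (l.takeWhile p).length := by
        rw [List.takeWhile_append_dropWhile]
    _ = l.dropWhile p := List.drop_left

-- A on a nonempty stripped line, in closed form
theorem pv_A_char (line : String) (c : Char) (r : List Char)
    (h : (PySem.Str.strip line).toList = c :: r) :
    wordstring line
      = (String.ofList ((c :: r).takeWhile (fun c => !PySem.Chars.isspace c)),
         String.ofList (((c :: r).dropWhile (fun c => !PySem.Chars.isspace c)).dropWhile (· == ' '))) := by
  have hstrip : PySem.Chars.strip line.toList = c :: r := by rw [← h, PySem.Str.toList_strip]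
  have hc : PySem.Chars.isspace c = false := pv_strip_head line.toList c r hstrip
  have hw := pv_split₀_head c r hc
  have hwne : (c :: r).takeWhile (fun c => !PySem.Chars.isspace c) ≠ [] := by simp [hc]
  have hwordsne : (PySem.Chars.split₀ (c :: r)).length ≠ 0 := by
    intro hlen
    rw [List.length_eq_zero_iff] at hlen
    rw [hlen] at hw
    exact hwne hw.symm
  unfold wordstring
  rw [h]
  simp only [List.length_cons, Nat.succ_ne_zero, if_false, if_neg hwordsne]
  rw [hw]
  have hsd := pv_skip_drop (c :: r) ((c :: r).takeWhile (fun c => !PySem.Chars.isspace c)).length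
  simp only [List.length_cons] at hsd
  simp [PySem.List.slice_from, hsd, pv_drop_takeWhile]

-- ---- B-side: characterisation of the state machine ----

theorem pv_b3 (v : List Char) : ∀ (w r : List Char),
    v.foldl (fun acc ch => wordstringStep acc.1 acc.2.1 acc.2.2 ch) (3, w, r) = (3, w, r ++ v) := by
  induction v with
  | nil => intro w r; simp
  | cons c v ih =>
    intro w r
    simp only [List.foldl_cons]
    rw [show wordstringStep 3 w r c = ((3 : Nat), w, r ++ [c]) from by simp [wordstringStep]]
    rw [ih]
    simp

theorem pv_b2 (v : List Char) : ∀ (w : List Char),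
    (v.foldl (fun acc ch => wordstringStep acc.1 acc.2.1 acc.2.2 ch) (2, w, [])).2
      = (w, v.dropWhile (· == ' ')) := by
  induction v with
  | nil => intro w; simp
  | cons c v ih =>
    intro w
    simp only [List.foldl_cons]
    by_cases hc : c = ' '
    · rw [show wordstringStep 2 w [] c = ((2 : Nat), w, ([] : List Char)) from by simp [wordstringStep, hc]]
      rw [ih w]
      simp [hc]
    · rw [show wordstringStep 2 w [] c = ((3 : Nat), w, [c]) from by simp [wordstringStep, hc]]
      rw [pv_b3]
      simp [hc]

theorem pv_b1 (v : List Char) : ∀ (w : List Char),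
    (v.foldl (fun acc ch => wordstringStep acc.1 acc.2.1 acc.2.2 ch) (1, w, [])).2
      = (w ++ v.takeWhile (fun c => !PySem.Chars.isspace c),
         (v.dropWhile (fun c => !PySem.Chars.isspace c)).dropWhile (· == ' ')) := by
  have hspc : PySem.Chars.isspace ' ' = true := by decide
  induction v with
  | nil => intro w; simp
  | cons c v ih =>
    intro w
    simp only [List.foldl_cons]
    by_cases hws : PySem.Chars.isspace c = true
    · by_cases hsp : c = ' '
      · rw [show wordstringStep 1 w [] c = ((2 : Nat), w, ([] : List Char)) from by
          simp [wordstringStep, hws, hsp, hspc]]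
        rw [pv_b2]
        simp [hsp, hspc]
      · rw [show wordstringStep 1 w [] c = ((3 : Nat), w, [c]) from by
          simp [wordstringStep, hws, hsp, hspc]]
        rw [pv_b3]
        simp [hws, hsp]
    · rw [show wordstringStep 1 w [] c = ((1 : Nat), w ++ [c], ([] : List Char)) from by
        simp [wordstringStep, hws]]
      rw [ih]
      simp [hws]

theorem pv_b0 (v : List Char) :
    v.foldl (fun acc ch => wordstringStep acc.1 acc.2.1 acc.2.2 ch) (0, [], [])
      = (v.dropWhile PySem.Chars.isspace).foldl
          (fun acc ch => wordstringStep acc.1 acc.2.1 acc.2.2 ch) (0, [], []) := by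
  induction v with
  | nil => simp
  | cons c v ih =>
    by_cases hws : PySem.Chars.isspace c = true
    · simp only [List.foldl_cons]
      rw [show wordstringStep 0 [] [] c = ((0 : Nat), ([] : List Char), ([] : List Char)) from by
        simp [wordstringStep, hws]]
      rw [ih]
      simp [hws]
    · simp [hws]

-- the whole scan, in closed form over the lstripped input
theorem pv_B_char (v : List Char) :
    (v.foldl (fun acc ch => wordstringStep acc.1 acc.2.1 acc.2.2 ch) (0, [], [])).2
      = ((v.dropWhile PySem.Chars.isspace).takeWhile (fun c => !PySem.Chars.isspace c),
         (((v.dropWhile PySem.Chars.isspace).dropWhile (fun c => !PySem.Chars.isspace c)).dropWhile (· == ' '))) := by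
  rw [pv_b0]
  cases h : v.dropWhile PySem.Chars.isspace with
  | nil => simp
  | cons c v' =>
    have hne : v.dropWhile PySem.Chars.isspace ≠ [] := by simp [h]
    have hc : PySem.Chars.isspace c = false := by
      have h2 := List.head_dropWhile_not (p := PySem.Chars.isspace) (l := v) hne
      have hhd : (v.dropWhile PySem.Chars.isspace).head hne = c := by simp [h]
      rw [hhd] at h2
      simpa using h2
    simp only [List.foldl_cons]
    rw [show wordstringStep 0 [] [] c = ((1 : Nat), [c], ([] : List Char)) from by
      simp [wordstringStep, hc]]
    rw [pv_b1]
    simp [List.takeWhile_cons, List.dropWhile_cons, hc]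

-- the pop loop is rstrip
theorem pv_pop_rstrip (r : List Char) : wordstringPop r = PySem.Chars.rstrip r := by
  induction r using List.reverseRecOn with
  | nil => simp [wordstringPop, PySem.Chars.rstrip]
  | append_singleton q c ih =>
    have hpop : wordstringPop (q ++ [c])
        = if PySem.Chars.isspace c = true then wordstringPop q else q ++ [c] := by
      rw [wordstringPop]
      split
      · next h => simp [List.getLast?_concat] at h
      · next c1 h =>
        have hc1 : c1 = c := by symm; simpa [List.getLast?_concat] using h
        rw [hc1, List.dropLast_concat]
    by_cases hc : PySem.Chars.isspace c = true
    · rw [hpop, if_pos hc, ih]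
      unfold PySem.Chars.rstrip
      simp [hc]
    · rw [hpop, if_neg hc]
      unfold PySem.Chars.rstrip
      simp only [List.reverse_append, List.reverse_singleton, List.singleton_append,
        List.dropWhile_cons]
      rw [if_neg (by simp [hc])]
      simp

-- ---- bridging lstrip-only and strip views ----

theorem pv_takeWhile_append_ws (t s : List Char) (hs : ∀ c ∈ s, PySem.Chars.isspace c = true) :
    (t ++ s).takeWhile (fun c => !PySem.Chars.isspace c) = t.takeWhile (fun c => !PySem.Chars.isspace c) := by
  induction t with
  | nil =>
    cases s with
    | nil => simp
    | cons c s' =>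
      have hc := hs c (by simp)
      simp [List.takeWhile_cons, hc]
  | cons a t ih =>
    simp only [List.cons_append, List.takeWhile_cons]
    split
    · rw [ih]
    · rfl

theorem pv_dropWhile_P_append_ws (t s : List Char) (hs : ∀ c ∈ s, PySem.Chars.isspace c = true) :
    (t ++ s).dropWhile (fun c => !PySem.Chars.isspace c) = t.dropWhile (fun c => !PySem.Chars.isspace c) ++ s := by
  induction t with
  | nil =>
    cases s with
    | nil => simp
    | cons c s' =>
      have hc := hs c (by simp)
      simp [List.dropWhile_cons, hc]
  | cons a t ih =>
    simp only [List.cons_append, List.dropWhile_cons]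
    split
    · rw [ih]
    · rfl

theorem pv_dropWhile_ws_append_all (s m : List Char) (hs : ∀ c ∈ s, PySem.Chars.isspace c = true) :
    (s ++ m).dropWhile PySem.Chars.isspace = m.dropWhile PySem.Chars.isspace := by
  induction s with
  | nil => simp
  | cons c s' ih =>
    have hc := hs c (by simp)
    rw [List.cons_append, List.dropWhile_cons, if_pos hc]
    exact ih (fun c hm => hs c (by simp [hm]))

theorem pv_dropWhile_append_ne_nil (d s : List Char) (h : d.dropWhile (· == ' ') ≠ []) :
    (d ++ s).dropWhile (· == ' ') = d.dropWhile (· == ' ') ++ s := by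
  induction d with
  | nil => simp at h
  | cons a d' ih =>
    simp only [List.cons_append, List.dropWhile_cons]
    by_cases ha : (a == ' ') = true
    · rw [if_pos ha, if_pos ha]
      rw [List.dropWhile_cons, if_pos ha] at h
      exact ih h
    · rw [if_neg ha, if_neg ha]
      simp

theorem pv_rstrip_all_ws (x : List Char) (hx : ∀ c ∈ x, PySem.Chars.isspace c = true) :
    PySem.Chars.rstrip x = [] := by
  unfold PySem.Chars.rstrip
  have : x.reverse.dropWhile PySem.Chars.isspace = [] := by
    rw [List.dropWhile_eq_nil_iff]
    intro c hc
    exact hx c (List.mem_reverse.mp hc)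
  rw [this, List.reverse_nil]

theorem pv_rstrip_append (x s : List Char) (c0 : Char) (hlast : x.getLast? = some c0)
    (hc0 : PySem.Chars.isspace c0 = false) (hs : ∀ c ∈ s, PySem.Chars.isspace c = true) :
    PySem.Chars.rstrip (x ++ s) = x := by
  unfold PySem.Chars.rstrip
  rw [List.reverse_append]
  rw [pv_dropWhile_ws_append_all s.reverse x.reverse (fun c hc => hs c (List.mem_reverse.mp hc))]
  have hxr : x.reverse.dropWhile PySem.Chars.isspace = x.reverse := by
    cases hxv : x.reverse with
    | nil => simp
    | cons a tl =>
      have ha : a = c0 := by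
        have : x.reverse.head? = x.getLast? := List.head?_reverse
        rw [hxv] at this
        simp only [List.head?_cons] at this
        rw [hlast] at this
        exact (Option.some_inj.mp this.symm).symm
      rw [List.dropWhile_cons, if_neg (by rw [ha, hc0]; simp)]
  rw [hxr, List.reverse_reverse]

-- rstrip is the prefix before the trailing whitespace
theorem pv_rstrip_decomp (l : List Char) :
    PySem.Chars.rstrip l ++ (l.reverse.takeWhile PySem.Chars.isspace).reverse = l := by
  unfold PySem.Chars.rstrip
  rw [← List.reverse_append, List.takeWhile_append_dropWhile, List.reverse_reverse]

theorem pv_rstrip_last (l : List Char) (h : PySem.Chars.rstrip l ≠ []) :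
    ∃ c0, (PySem.Chars.rstrip l).getLast? = some c0 ∧ PySem.Chars.isspace c0 = false := by
  unfold PySem.Chars.rstrip at h ⊢
  have hne : l.reverse.dropWhile PySem.Chars.isspace ≠ [] := by
    intro hn
    rw [hn] at h
    simp at h
  refine ⟨(l.reverse.dropWhile PySem.Chars.isspace).head hne, ?_, ?_⟩
  · rw [List.getLast?_reverse]
    exact List.head?_eq_some_head hne
  · have := List.head_dropWhile_not (p := PySem.Chars.isspace) (l := l.reverse) hne
    simpa using this


-- ===== VERDICT (by name: the statement is the Claim_ definition above) =====
theorem wordstring_spec : Claim_equal_wordstring := by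
  intro line _
  unfold Spec_wordstring
  have hB : wordstring_alt line
      = (String.ofList ((line.toList.dropWhile PySem.Chars.isspace).takeWhile (fun c => !PySem.Chars.isspace c)),
         String.ofList (PySem.Chars.rstrip
           (((line.toList.dropWhile PySem.Chars.isspace).dropWhile (fun c => !PySem.Chars.isspace c)).dropWhile (· == ' ')))) := by
    simp only [wordstring_alt]
    rw [pv_B_char]
    simp [pv_pop_rstrip]
  set l := line.toList.dropWhile PySem.Chars.isspace with hl
  have hstripl : (PySem.Str.strip line).toList = PySem.Chars.rstrip l := by
    rw [PySem.Str.toList_strip]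
    unfold PySem.Chars.strip PySem.Chars.lstrip
    rfl
  cases ht : PySem.Chars.rstrip l with
  | nil =>
    have hAnil : wordstring line = ("", "") := by
      unfold wordstring
      rw [hstripl, ht]
      simp
    have hlnil : l = [] := by
      cases hlv : l with
      | nil => rfl
      | cons a tl =>
        exfalso
        have e : line.toList.dropWhile PySem.Chars.isspace = a :: tl := by rw [← hl]; exact hlv
        have hne2 : line.toList.dropWhile PySem.Chars.isspace ≠ [] := by rw [e]; simp
        have hhd := List.head_dropWhile_not (p := PySem.Chars.isspace) (l := line.toList) hne2
        have hdec := pv_rstrip_decomp l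
        rw [ht, List.nil_append] at hdec
        have hmem : a ∈ l := by rw [hlv]; simp
        rw [← hdec] at hmem
        have hws : PySem.Chars.isspace a = true :=
          List.mem_takeWhile_imp (List.mem_reverse.mp hmem)
        simp [e, hws] at hhd
    rw [hAnil, hB, hlnil]
    have : PySem.Chars.rstrip ([] : List Char) = [] := rfl
    simp [this]
  | cons c r =>
    have hA := pv_A_char line c r (by rw [hstripl, ht])
    have hdec : (c :: r) ++ (l.reverse.takeWhile PySem.Chars.isspace).reverse = l := by
      rw [← ht]
      exact pv_rstrip_decomp l
    have hs0ws : ∀ cc ∈ (l.reverse.takeWhile PySem.Chars.isspace).reverse,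
        PySem.Chars.isspace cc = true := by
      intro cc hcc
      exact List.mem_takeWhile_imp (List.mem_reverse.mp hcc)
    obtain ⟨c0, hlast, hc0⟩ := pv_rstrip_last l (by rw [ht]; simp)
    rw [ht] at hlast
    rw [hA, hB, ← hdec]
    rw [pv_takeWhile_append_ws _ _ hs0ws, pv_dropWhile_P_append_ws _ _ hs0ws]
    refine Prod.ext rfl ?_
    simp only
    by_cases hd : (c :: r).dropWhile (fun c => !PySem.Chars.isspace c) = []
    · rw [hd, List.nil_append]
      rw [pv_rstrip_all_ws _ (fun cc hcc => hs0ws cc ((List.dropWhile_suffix _).sublist.subset hcc))]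
      simp
    · have hdlast : ((c :: r).dropWhile (fun c => !PySem.Chars.isspace c)).getLast? = some c0 := by
        rw [← List.takeWhile_append_dropWhile (p := fun c => !PySem.Chars.isspace c) (l := c :: r)] at hlast
        rwa [List.getLast?_append_of_ne_nil _ hd] at hlast
      have hx : ((c :: r).dropWhile (fun c => !PySem.Chars.isspace c)).dropWhile (· == ' ') ≠ [] := by
        intro hn
        rw [List.dropWhile_eq_nil_iff] at hn
        have hmem := List.mem_of_getLast? hdlast
        have hsp : (c0 == ' ') = true := hn c0 hmem
        have : c0 = ' ' := by simpa using hsp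
        rw [this] at hc0
        exact absurd hc0 (by decide)
      have hxlast : (((c :: r).dropWhile (fun c => !PySem.Chars.isspace c)).dropWhile (· == ' ')).getLast? = some c0 := by
        rw [← List.takeWhile_append_dropWhile (p := (· == ' '))
          (l := (c :: r).dropWhile (fun c => !PySem.Chars.isspace c))] at hdlast
        rwa [List.getLast?_append_of_ne_nil _ hx] at hdlast
      rw [pv_dropWhile_append_ne_nil _ _ hx, pv_rstrip_append _ _ c0 hxlast hc0 hs0ws]
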